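-- pv_equiv track=rewrite | github.com/Lildhansen/ConnectFour | winCondition.py | checkForAtLeast1PieceIn4ConsecutiveRowsAndColumns
-- ===== SOURCE A (Python) =====
-- SENTINEL_VALUE = -1000
--
-- def checkForAtLeast1PieceIn4ConsecutiveRowsAndColumns(numInRows,numInColumns):
-- 	count = 0
-- 	for numInColumn in numInColumns: #make extra checks to prevent huge complexity
-- 		if count == 4:
-- 			break
-- 		if numInColumn == SENTINEL_VALUE:
-- 			continue
-- 		if numInColumn > 0:
-- 			count += 1
-- 		else:
-- 			count = 0
-- 	if count < 4:
-- 		return None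
-- 	count = 0
-- 	for numInRow in numInRows:
-- 		if count == 4:
-- 			break
-- 		if numInRow == SENTINEL_VALUE:
-- 			continue
-- 		if numInRow > 0:
-- 			count += 1
-- 		else:
-- 			count = 0
-- 	if count < 4:
-- 		return None
-- 	return True
-- ===== SOURCE B (Python) =====
-- SENTINEL_VALUE = -1000
--
-- def _has4(values):
--     filtered = [v for v in values if v != SENTINEL_VALUE]
--     return any(all(x > 0 for x in filtered[i:i + 4])
--                for i in range(len(filtered) - 3))
--
-- def checkForAtLeast1PieceIn4ConsecutiveRowsAndColumns(numInRows, numInColumns):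
--     if not _has4(numInColumns):
--         return None
--     if not _has4(numInRows):
--         return None
--     return True
-- ===== Notes on version B (the rewrite author's own statement) =====
-- stated objective: idiomatic
-- what changed: Replaced the streaming counter-with-break-and-continue scan by a declarative check: filter out sentinel values, then test with any/all whether some length-4 window of the filtered list is all positive.
import Mathlib
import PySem

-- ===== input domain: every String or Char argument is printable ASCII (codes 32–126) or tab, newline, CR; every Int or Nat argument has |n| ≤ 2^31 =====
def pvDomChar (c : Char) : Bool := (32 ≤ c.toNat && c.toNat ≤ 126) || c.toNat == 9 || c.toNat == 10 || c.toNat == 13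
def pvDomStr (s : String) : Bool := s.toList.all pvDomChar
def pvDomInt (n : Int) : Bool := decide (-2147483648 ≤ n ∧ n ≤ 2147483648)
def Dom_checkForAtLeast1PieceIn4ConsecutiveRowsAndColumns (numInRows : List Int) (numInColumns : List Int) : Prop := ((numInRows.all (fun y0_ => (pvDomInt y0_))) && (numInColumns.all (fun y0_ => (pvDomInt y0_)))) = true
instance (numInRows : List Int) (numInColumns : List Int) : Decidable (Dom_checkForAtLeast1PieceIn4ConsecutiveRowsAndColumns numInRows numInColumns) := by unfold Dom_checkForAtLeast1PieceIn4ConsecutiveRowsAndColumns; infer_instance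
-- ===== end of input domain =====

-- B replaces A's streaming counter (with break/continue) by an idiomatic declarative check:
-- filter out sentinels, then test whether any length-4 window of the filtered list is all positive.

-- ===== PORT A =====
-- the for-loop of A: state is `count`; `break` at count == 4 returns count (nothing after the loop changes it)
def pvScanA : List Int → Int → Int
  | [], count => count
  | v :: rest, count =>
    if count == 4 then count
    else if v == -1000 then pvScanA rest count
    else if 0 < v then pvScanA rest (count + 1)
    else pvScanA rest 0

def checkForAtLeast1PieceIn4ConsecutiveRowsAndColumns (numInRows : List Int) (numInColumns : List Int) : Option Bool :=
  if pvScanA numInColumns 0 < 4 then none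
  else if pvScanA numInRows 0 < 4 then none
  else some true

-- ===== PORT B =====
-- Source B's _has4: list-comprehension filter, then any/all over windows filtered[i:i+4]
def pvHas4 (values : List Int) : Bool :=
  let filtered := values.filter (fun v => v != -1000)
  (PySem.List.pyRange 0 ((filtered.length : Int) - 3) 1).any
    (fun i => (PySem.List.slice filtered (some i) (some (i + 4))).all (fun x => decide (0 < x)))

def checkForAtLeast1PieceIn4ConsecutiveRowsAndColumns_alt (numInRows : List Int) (numInColumns : List Int) : Option Bool :=
  if !pvHas4 numInColumns then none
  else if !pvHas4 numInRows then none
  else some true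

-- ===== PRECONDITION & SPEC =====
def Spec_checkForAtLeast1PieceIn4ConsecutiveRowsAndColumns (numInRows : List Int) (numInColumns : List Int) (out : Option Bool) : Prop := out = checkForAtLeast1PieceIn4ConsecutiveRowsAndColumns_alt numInRows numInColumns
instance (numInRows : List Int) (numInColumns : List Int) (out : Option Bool) : Decidable (Spec_checkForAtLeast1PieceIn4ConsecutiveRowsAndColumns numInRows numInColumns out) := by unfold Spec_checkForAtLeast1PieceIn4ConsecutiveRowsAndColumns; infer_instance

-- ===== CLAIM (what is proved, stated in full; the proofs are below) =====
def Claim_equal_checkForAtLeast1PieceIn4ConsecutiveRowsAndColumns : Prop := ∀ (numInRows : List Int) (numInColumns : List Int), Dom_checkForAtLeast1PieceIn4ConsecutiveRowsAndColumns numInRows numInColumns → Spec_checkForAtLeast1PieceIn4ConsecutiveRowsAndColumns numInRows numInColumns (checkForAtLeast1PieceIn4ConsecutiveRowsAndColumns numInRows numInColumns)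

-- ===== LEMMAS AND PROOFS =====

-- length of the maximal positive prefix
def pvPfx : List Int → Nat
  | [] => 0
  | x :: xs => if 0 < x then pvPfx xs + 1 else 0

-- some suffix starts with at least 4 positives
def pvHasRun : List Int → Bool
  | [] => false
  | x :: xs => decide (4 ≤ pvPfx (x :: xs)) || pvHasRun xs

theorem pvPfx_le_length (l : List Int) : pvPfx l ≤ l.length := by
  induction l with
  | nil => simp [pvPfx]
  | cons x xs ih => simp only [pvPfx, List.length_cons]; split <;> omega

theorem pvPfx4_hasRun (l : List Int) (h : 4 ≤ pvPfx l) : pvHasRun l = true := by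
  cases l with
  | nil => simp [pvPfx] at h
  | cons x xs => simp [pvHasRun, h]

theorem pvScanA_four (l : List Int) : pvScanA l 4 = 4 := by
  cases l <;> simp [pvScanA]

theorem pvScanA_filter (l : List Int) (c : Int) :
    pvScanA l c = pvScanA (l.filter (fun v => v != -1000)) c := by
  induction l generalizing c with
  | nil => rfl
  | cons v rest ih =>
    by_cases hc : c = 4
    · subst hc; rw [pvScanA_four, pvScanA_four]
    · by_cases hv : v = -1000
      · subst hv
        simp [pvScanA, hc, ih]
      · simp only [List.filter_cons, bne_iff_ne, ne_eq, hv, not_false_eq_true, if_pos]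
        simp only [pvScanA, beq_iff_eq, hc, hv, if_false]
        split <;> [exact ih _; exact ih _]

theorem pvScanA_le (l : List Int) (c : Int) (h0 : 0 ≤ c) (h4 : c ≤ 4) : pvScanA l c ≤ 4 := by
  induction l generalizing c with
  | nil => simpa [pvScanA] using h4
  | cons v rest ih =>
    simp only [pvScanA]
    split
    · omega
    · rename_i hc
      split
      · exact ih c h0 h4
      · split
        · exact ih (c + 1) (by omega) (by simp at hc; omega)
        · exact ih 0 (by omega) (by omega)

theorem pvScanA_char (l : List Int) (c : Int) (hs : ∀ v ∈ l, v ≠ -1000)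
    (h0 : 0 ≤ c) (h4 : c ≤ 4) :
    (pvScanA l c = 4 ↔ c = 4 ∨ 4 ≤ c + (pvPfx l : Int) ∨ pvHasRun l = true) := by
  induction l generalizing c with
  | nil => simp [pvScanA, pvPfx, pvHasRun]; omega
  | cons v rest ih =>
    have hv : v ≠ -1000 := hs v (by simp)
    have hs' : ∀ x ∈ rest, x ≠ -1000 := fun x hx => hs x (by simp [hx])
    by_cases hc : c = 4
    · subst hc; rw [pvScanA_four]; simp
    · by_cases hp : 0 < v
      · rw [show pvScanA (v :: rest) c = pvScanA rest (c + 1) by simp [pvScanA, hc, hv, hp]]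
        rw [ih (c + 1) hs' (by omega) (by omega)]
        by_cases hr : pvHasRun rest = true <;>
          simp [pvPfx, pvHasRun, hp, hr, hc] <;> push_cast <;> omega
      · rw [show pvScanA (v :: rest) c = pvScanA rest 0 by simp [pvScanA, hc, hv, hp]]
        rw [ih 0 hs' (by omega) (by omega)]
        by_cases hr : pvHasRun rest = true
        · simp [pvPfx, pvHasRun, hp, hr, hc]
        · have h5 : ¬ (4 ≤ pvPfx rest) := fun h => hr (pvPfx4_hasRun rest h)
          simp [pvPfx, pvHasRun, hp, hr, hc, h5]
          omega

theorem pvWindow_take (l : List Int) (h : 4 ≤ l.length) :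
    ((l.take 4).all (fun x => decide (0 < x))) = decide (4 ≤ pvPfx l) := by
  match l, h with
  | a :: b :: c :: d :: rest, _ =>
    simp only [List.take, List.all_cons, List.all_nil, pvPfx]
    by_cases ha : 0 < a <;> by_cases hb : 0 < b <;> by_cases hc : 0 < c <;> by_cases hd : 0 < d <;>
      simp [ha, hb, hc, hd] <;> omega

theorem pvWindow_eq_hasRun (l : List Int) :
    ((List.range (l.length - 3)).any (fun k => ((l.drop k).take 4).all (fun x => decide (0 < x)))) = pvHasRun l := by
  induction l with
  | nil => simp [pvHasRun]
  | cons x xs ih =>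
    by_cases hlen : xs.length < 3
    · have h1 : (x :: xs).length - 3 = 0 := by simp; omega
      have h2 : xs.length - 3 = 0 := by omega
      rw [h1]
      have hR : pvHasRun xs = false := by rw [← ih, h2]; simp
      have hp : pvPfx (x :: xs) ≤ (x :: xs).length := pvPfx_le_length _
      simp only [pvHasRun, hR, Bool.or_false, List.range_zero, List.any_nil]
      simp only [List.length_cons] at hp
      have : ¬ (4 ≤ pvPfx (x :: xs)) := by omega
      simp [this]
    · have h1 : (x :: xs).length - 3 = (xs.length - 3) + 1 := by simp; omega
      rw [h1, List.range_succ_eq_map]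
      simp only [List.any_cons, List.any_map]
      have h0 : (((x :: xs).drop 0).take 4).all (fun x => decide (0 < x)) = decide (4 ≤ pvPfx (x :: xs)) := by
        rw [List.drop_zero]; exact pvWindow_take _ (by simp; omega)
      have h2 : ((fun k => (((x :: xs).drop k).take 4).all (fun x => decide (0 < x))) ∘ Nat.succ)
          = fun k => ((xs.drop k).take 4).all (fun x => decide (0 < x)) := by
        funext k
        simp [Function.comp, Nat.succ_eq_add_one]
      simp only [h0, h2]
      rw [ih]
      simp [pvHasRun]

theorem pvHas4_eq (xs : List Int) : pvHas4 xs = pvHasRun (xs.filter (fun v => v != -1000)) := by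
  unfold pvHas4
  set f := xs.filter (fun v => v != -1000) with hf
  show ((PySem.List.pyRange 0 ((f.length : Int) - 3) 1).any
      fun i => (PySem.List.slice f (some i) (some (i + 4))).all fun x => decide (0 < x)) = pvHasRun f
  rw [PySem.List.pyRange_one]
  have ht : ((((f.length : Int)) - 3) - 0).toNat = f.length - 3 := by omega
  rw [ht]
  simp only [List.any_map, Function.comp_def, zero_add]
  have hsl : ∀ k : Nat, PySem.List.slice f (some (k : Int)) (some ((k : Int) + 4)) = (f.drop k).take 4 := by
    intro k
    have : ((k : Int) + 4) = ((k : Int) + ((4 : Nat) : Int)) := by norm_num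
    rw [this, PySem.List.slice_natCast_add]
  simp only [hsl]
  exact pvWindow_eq_hasRun f

theorem pvScan_lt_iff (xs : List Int) : (pvScanA xs 0 < 4) ↔ pvHas4 xs = false := by
  rw [pvScanA_filter]
  set f := xs.filter (fun v => v != -1000) with hf
  have hs : ∀ v ∈ f, v ≠ -1000 := by
    intro v hv
    have := (List.mem_filter.mp hv).2
    simpa using this
  have hle := pvScanA_le f 0 (by norm_num) (by norm_num)
  have hch := pvScanA_char f 0 hs (by norm_num) (by norm_num)
  have h4 : pvScanA f 0 = 4 ↔ pvHasRun f = true := by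
    rw [hch]
    constructor
    · rintro (h | h | h)
      · omega
      · exact pvPfx4_hasRun f (by omega)
      · exact h
    · exact fun h => Or.inr (Or.inr h)
  rw [pvHas4_eq xs, ← hf]
  constructor
  · intro h
    have : ¬ pvScanA f 0 = 4 := by omega
    simpa [h4] using this
  · intro h
    have : ¬ pvHasRun f = true := by simp [h]
    have := (not_iff_not.mpr h4).mpr this
    omega

-- ===== VERDICT (by name: the statement is the Claim_ definition above) =====
theorem checkForAtLeast1PieceIn4ConsecutiveRowsAndColumns_spec : Claim_equal_checkForAtLeast1PieceIn4ConsecutiveRowsAndColumns := by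
  intro numInRows numInColumns _
  unfold Spec_checkForAtLeast1PieceIn4ConsecutiveRowsAndColumns
  unfold checkForAtLeast1PieceIn4ConsecutiveRowsAndColumns checkForAtLeast1PieceIn4ConsecutiveRowsAndColumns_alt
  have eC := pvScan_lt_iff numInColumns
  have eR := pvScan_lt_iff numInRows
  cases hC : pvHas4 numInColumns <;> cases hR : pvHas4 numInRows <;>
    simp [hC, hR] at eC eR <;> simp [eC, eR, hC]
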